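-- pv_equiv track=rewrite | github.com/handsomeZR-netizen/plotweaver-skillkit | .agents/skills/wechat-analysis/scripts/run_analysis.py | _validation_summary
-- ===== SOURCE A (Python) =====
-- def _validation_summary(records: list[dict]) -> dict:
--     counts = {"validated": 0, "failed": 0, "skipped": 0}
--     for record in records:
--         status = record.get("status", "")
--         if status in counts:
--             counts[status] += 1
--     counts["record_count"] = len(records)
--     return counts
-- ===== SOURCE B (Python) =====
-- def _validation_summary(records: list[dict]) -> dict:
--     counts = {
--         "validated": sum(1 for r in records if r.get("status", "") == "validated"),
--         "failed": sum(1 for r in records if r.get("status", "") == "failed"),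
--         "skipped": sum(1 for r in records if r.get("status", "") == "skipped"),
--     }
--     counts["record_count"] = len(records)
--     return counts
-- ===== Notes on version B (the rewrite author's own statement) =====
-- stated objective: alternative
-- what changed: Replaces the single loop that increments a mutable counts dict key-by-key with three independent filtering scans (one sum-comprehension per status) that build the dict directly in its final key order, plus len() for record_count.
import Mathlib
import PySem

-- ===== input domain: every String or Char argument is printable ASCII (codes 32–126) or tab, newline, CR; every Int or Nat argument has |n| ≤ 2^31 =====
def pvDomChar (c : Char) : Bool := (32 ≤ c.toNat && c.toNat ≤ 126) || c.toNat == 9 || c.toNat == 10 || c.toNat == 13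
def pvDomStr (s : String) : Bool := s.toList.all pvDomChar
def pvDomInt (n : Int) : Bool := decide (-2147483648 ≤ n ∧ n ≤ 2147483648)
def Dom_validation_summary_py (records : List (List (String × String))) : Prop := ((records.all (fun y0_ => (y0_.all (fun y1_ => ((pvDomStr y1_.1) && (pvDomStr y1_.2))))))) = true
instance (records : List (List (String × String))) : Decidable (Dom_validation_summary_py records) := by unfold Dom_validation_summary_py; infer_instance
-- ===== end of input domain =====

-- B replaces A's single mutable-dict incrementing loop with three independent per-status
-- filtering counts plus len(), building the result in final key order (alternative, same cost).

-- ===== PORT A =====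
-- r.get("status", "") : first-match lookup in the record's association list (Python dict get)
def pvStatus (record : List (String × String)) : String :=
  PySem.Dict.getD (PySem.Dict.mk record) "status" ""

def validation_summary_py (records : List (List (String × String))) : List (String × Int) :=
  let counts : PySem.Dict String Int :=
    PySem.Dict.ofList [("validated", 0), ("failed", 0), ("skipped", 0)]
  let counts := records.foldl (fun counts record =>
    let status := pvStatus record
    if counts.contains status then counts.modify status 0 (· + 1) else counts) counts
  (counts.insert "record_count" (records.length : Int)).items

-- ===== PORT B =====
-- sum(1 for r in records if r.get("status","") == s), ported as countP
def vsCount (records : List (List (String × String))) (s : String) : Int :=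
  (records.countP (fun r => pvStatus r == s) : Int)

def validation_summary_py_alt (records : List (List (String × String))) : List (String × Int) :=
  [("validated", vsCount records "validated"),
   ("failed", vsCount records "failed"),
   ("skipped", vsCount records "skipped"),
   ("record_count", (records.length : Int))]

-- ===== PRECONDITION & SPEC =====
def Spec_validation_summary_py (records : List (List (String × String))) (out : List (String × Int)) : Prop := out = validation_summary_py_alt records
instance (records : List (List (String × String))) (out : List (String × Int)) : Decidable (Spec_validation_summary_py records out) := by unfold Spec_validation_summary_py; infer_instance

-- ===== CLAIM (what is proved, stated in full; the proofs are below) =====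
def Claim_equal_validation_summary_py : Prop := ∀ (records : List (List (String × String))), Dom_validation_summary_py records → Spec_validation_summary_py records (validation_summary_py records)

-- ===== LEMMAS AND PROOFS =====
-- one step of A's loop on the literal 3-key dict, for an arbitrary status string
theorem vs_step (a b c : Int) (st : String) :
    (if (PySem.Dict.mk [("validated", a), ("failed", b), ("skipped", c)]).contains st
     then (PySem.Dict.mk [("validated", a), ("failed", b), ("skipped", c)]).modify st 0 (· + 1)
     else PySem.Dict.mk [("validated", a), ("failed", b), ("skipped", c)]) =
    PySem.Dict.mk [("validated", if st = "validated" then a + 1 else a),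
                   ("failed", if st = "failed" then b + 1 else b),
                   ("skipped", if st = "skipped" then c + 1 else c)] := by
  by_cases h1 : st = "validated"
  · subst h1
    apply PySem.Dict.ext
    simp [PySem.Dict.modify, PySem.Dict.items_insert_of_contains, PySem.Dict.getD,
      PySem.Dict.get?_mk_cons]
  · by_cases h2 : st = "failed"
    · subst h2
      apply PySem.Dict.ext
      simp [PySem.Dict.modify, PySem.Dict.items_insert_of_contains, PySem.Dict.getD,
        PySem.Dict.get?_mk_cons]
    · by_cases h3 : st = "skipped"
      · subst h3
        apply PySem.Dict.ext
        simp [PySem.Dict.modify, PySem.Dict.items_insert_of_contains, PySem.Dict.getD,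
          PySem.Dict.get?_mk_cons]
      · have hc : (PySem.Dict.mk [("validated", a), ("failed", b), ("skipped", c)]).contains st = false := by
          simp [PySem.Dict.contains_mk]; tauto
        simp [hc, h1, h2, h3]

-- loop invariant: folding A's step over records adds each status's count to the initial values
theorem vs_loop (records : List (List (String × String))) (a b c : Int) :
    records.foldl (fun counts record =>
      let status := pvStatus record
      if counts.contains status then counts.modify status 0 (· + 1) else counts)
      (PySem.Dict.mk [("validated", a), ("failed", b), ("skipped", c)]) =
    PySem.Dict.mk [("validated", a + vsCount records "validated"),
                   ("failed", b + vsCount records "failed"),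
                   ("skipped", c + vsCount records "skipped")] := by
  induction records generalizing a b c with
  | nil => simp [vsCount]
  | cons r rs ih =>
    simp only [List.foldl_cons]
    rw [vs_step, ih]
    simp only [vsCount, List.countP_cons]
    apply PySem.Dict.ext
    by_cases h1 : pvStatus r = "validated" <;> by_cases h2 : pvStatus r = "failed" <;>
      by_cases h3 : pvStatus r = "skipped" <;>
      simp [h1, h2, h3] <;> ring

-- ===== VERDICT (by name: the statement is the Claim_ definition above) =====
theorem validation_summary_py_spec : Claim_equal_validation_summary_py := by
  intro records _
  unfold Spec_validation_summary_py validation_summary_py validation_summary_py_alt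
  show ((PySem.Dict.mk [("validated", (0:Int)), ("failed", 0), ("skipped", 0)] |>
      records.foldl (fun counts record =>
        let status := pvStatus record
        if counts.contains status then counts.modify status 0 (· + 1) else counts)).insert
        "record_count" (records.length : Int)).items = _
  rw [show PySem.Dict.mk [("validated", (0:Int)), ("failed", 0), ("skipped", 0)] =
      PySem.Dict.mk [("validated", 0), ("failed", 0), ("skipped", 0)] from rfl]
  rw [vs_loop]
  simp [PySem.Dict.items_insert, PySem.Dict.contains_mk]
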